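-- pv_equiv track=rewrite | github.com/sonamg111/IMDB-web-scraping-python | sixth_task.py | analyse_movies_language
-- ===== SOURCE A (Python) =====
-- def analyse_movies_language(duplicateLanguage,language):
--         allLanguagecount={}
--         for i in duplicateLanguage:
--                 count=1
--                 for j in language:
--                         if i==j:
--                                 allLanguagecount[i]=count
--                                 count=count+1
--         return (allLanguagecount)
-- ===== SOURCE B (Python) =====
-- def analyse_movies_language(duplicateLanguage, language):
--     # one counting pass over `language`, then one lookup pass over `duplicateLanguage`
--     counts = {}
--     for j in language:
--         counts[j] = counts.get(j, 0) + 1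
--     result = {}
--     for i in duplicateLanguage:
--         if i in counts:
--             result[i] = counts[i]
--     return result
-- ===== Notes on version B (the rewrite author's own statement) =====
-- stated objective: faster
-- what changed: Replaces A's nested scan (for every element of duplicateLanguage, a full pass over language) by one counting pass over language building a dict of counts, then a single lookup pass over duplicateLanguage.
import Mathlib
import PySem

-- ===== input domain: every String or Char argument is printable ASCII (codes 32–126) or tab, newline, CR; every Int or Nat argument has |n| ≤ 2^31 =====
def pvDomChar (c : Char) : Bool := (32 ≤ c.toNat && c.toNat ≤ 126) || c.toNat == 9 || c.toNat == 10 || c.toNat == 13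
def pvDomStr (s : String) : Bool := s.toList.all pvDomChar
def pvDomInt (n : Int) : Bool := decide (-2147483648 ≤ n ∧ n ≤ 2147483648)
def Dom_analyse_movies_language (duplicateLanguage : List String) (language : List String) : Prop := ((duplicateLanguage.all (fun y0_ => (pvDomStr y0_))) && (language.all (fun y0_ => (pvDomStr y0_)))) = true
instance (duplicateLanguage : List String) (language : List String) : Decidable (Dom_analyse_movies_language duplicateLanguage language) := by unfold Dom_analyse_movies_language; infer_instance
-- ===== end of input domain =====

-- B replaces A's nested outer/inner scan by one counting pass over `language` plus one
-- lookup pass over `duplicateLanguage` (objective: faster, O(n*m) → O(n+m)).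

-- ===== PORT A =====
-- outer loop over duplicateLanguage; for each i, inner loop over language with state (dict, count)
def analyse_movies_language (duplicateLanguage : List String) (language : List String) : List (String × Int) :=
  (duplicateLanguage.foldl (fun (d : PySem.Dict String Int) i =>
      (language.foldl (fun (p : PySem.Dict String Int × Int) j =>
          if i == j then (p.1.insert i p.2, p.2 + 1) else p) (d, 1)).1)
    PySem.Dict.empty).items

-- ===== PORT B =====
def analyse_movies_language_alt (duplicateLanguage : List String) (language : List String) : List (String × Int) :=
  let counts : PySem.Dict String Int :=
    language.foldl (fun c j => c.insert j (c.getD j 0 + 1)) PySem.Dict.empty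
  (duplicateLanguage.foldl (fun (r : PySem.Dict String Int) i =>
      if counts.contains i then r.insert i (counts.getD i 0) else r)
    PySem.Dict.empty).items

-- ===== PRECONDITION & SPEC =====
def Spec_analyse_movies_language (duplicateLanguage : List String) (language : List String) (out : List (String × Int)) : Prop := out = analyse_movies_language_alt duplicateLanguage language
instance (duplicateLanguage : List String) (language : List String) (out : List (String × Int)) : Decidable (Spec_analyse_movies_language duplicateLanguage language out) := by unfold Spec_analyse_movies_language; infer_instance

-- ===== CLAIM (what is proved, stated in full; the proofs are below) =====
def Claim_equal_analyse_movies_language : Prop := ∀ (duplicateLanguage : List String) (language : List String), Dom_analyse_movies_language duplicateLanguage language → Spec_analyse_movies_language duplicateLanguage language (analyse_movies_language duplicateLanguage language)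

-- ===== LEMMAS AND PROOFS =====

-- A's inner loop over `language`: repeated overwrites at key i collapse to one insert
-- of the final count (and the counter ends at c + count).
theorem pv_inner_loop (i : String) (language : List String)
    (d : PySem.Dict String Int) (c : Int) :
    language.foldl (fun (p : PySem.Dict String Int × Int) j =>
        if i == j then (p.1.insert i p.2, p.2 + 1) else p) (d, c)
      = (if language.count i = 0 then d else d.insert i (c + language.count i - 1),
         c + language.count i) := by
  induction language generalizing d c with
  | nil => simp
  | cons j rest ih =>
    by_cases h : i = j
    · subst h
      simp only [List.foldl_cons, beq_self_eq_true, if_true, List.count_cons_self, ih]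
      rcases Nat.eq_zero_or_pos (rest.count i) with h0 | h0
      · simp [h0]
      · have hne : rest.count i ≠ 0 := Nat.pos_iff_ne_zero.mp h0
        simp [hne, PySem.Dict.insert_insert_self]
        constructor
        · congr 1; ring
        · ring
    · have hb : (i == j) = false := by simp [h]
      rw [List.foldl_cons, if_neg (by simp [hb]), ih, List.count_cons_of_ne (Ne.symm h)]

-- A's outer step equals B's outer step once B's counts dict is seen as `counter language`.
theorem pv_step_eq (language : List String) :
    (fun (d : PySem.Dict String Int) i =>
        (language.foldl (fun (p : PySem.Dict String Int × Int) j =>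
            if i == j then (p.1.insert i p.2, p.2 + 1) else p) (d, 1)).1)
      = (fun (r : PySem.Dict String Int) i =>
          if (PySem.Dict.counter language).contains i then
            r.insert i ((PySem.Dict.counter language).getD i 0)
          else r) := by
  funext d i
  rw [pv_inner_loop]
  simp only [PySem.Dict.contains_counter, PySem.Dict.getD_counter]
  by_cases h : language.count i = 0
  · have hni : i ∉ language := List.count_eq_zero.mp h
    simp [h, hni]
  · have hi : i ∈ language := List.count_pos_iff.mp (Nat.pos_of_ne_zero h)
    simp [h, hi, add_sub_cancel_left]

-- ===== VERDICT (by name: the statement is the Claim_ definition above) =====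
theorem analyse_movies_language_spec : Claim_equal_analyse_movies_language := by
  intro dup lang _
  unfold Spec_analyse_movies_language
  simp only [analyse_movies_language, analyse_movies_language_alt]
  rw [PySem.Dict.foldl_insert_getD_add_one_eq_counter, pv_step_eq lang]
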